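-- pv_equiv track=rewrite | github.com/ildyria/personal-website | files/build_dep_coq.py | find_imports
-- ===== SOURCE A (Python) =====
-- def find_imports(list_words, i):
-- 	if i < len(list_words):
-- 		if list_words[i] == 'Import' or list_words[i] == 'Export':
-- 			return find_imports(list_words, i + 1)
--
-- 		elif list_words[i].find('.') > 0:
-- 			return [list_words[i]] + find_imports(list_words, i + 1)
--
-- 		else:
-- 			return find_imports(list_words, i + 1)
-- 	else:
-- 		return []
-- ===== SOURCE B (Python) =====
-- def find_imports(list_words, i):
--     # The 'Import'/'Export' branch of A is redundant: those words contain no dot,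
--     # so a single comprehension keeping dotted words over the scanned index range suffices.
--     return [list_words[j] for j in range(i, len(list_words)) if list_words[j].find('.') > 0]
-- ===== Notes on version B (the rewrite author's own statement) =====
-- stated objective: simpler
-- what changed: Replaced the three-branch recursion with a single list comprehension over range(i, len) keeping words whose find('.') > 0; the Import/Export branch is dropped as redundant since those words contain no dot.
import Mathlib
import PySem

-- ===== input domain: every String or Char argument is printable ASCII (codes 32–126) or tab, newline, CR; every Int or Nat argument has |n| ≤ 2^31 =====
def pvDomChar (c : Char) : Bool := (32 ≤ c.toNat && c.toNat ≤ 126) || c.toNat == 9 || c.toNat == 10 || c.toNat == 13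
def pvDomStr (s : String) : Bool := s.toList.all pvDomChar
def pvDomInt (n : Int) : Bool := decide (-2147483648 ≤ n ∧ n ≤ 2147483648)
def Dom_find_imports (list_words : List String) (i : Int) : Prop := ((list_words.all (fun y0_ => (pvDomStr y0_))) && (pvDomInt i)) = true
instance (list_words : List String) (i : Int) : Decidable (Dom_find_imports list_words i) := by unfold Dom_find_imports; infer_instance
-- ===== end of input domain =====

-- B: one list comprehension over range(i, len) keeping dotted words; the redundant Import/Export branch is dropped (objective: simpler).


-- ===== PORT A =====
def find_imports (list_words : List String) (i : Int) : List String :=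
  if _h : i < (list_words.length : Int) then
    match PySem.List.pyGet? list_words i with
    | none => []  -- IndexError in Python; excluded by Pre_find_imports
    | some w =>
      if w = "Import" ∨ w = "Export" then find_imports list_words (i + 1)
      else if 0 < PySem.Str.find w "." then w :: find_imports list_words (i + 1)
      else find_imports list_words (i + 1)
  else []
termination_by ((list_words.length : Int) - i).toNat
decreasing_by all_goals omega

-- ===== PORT B =====
-- the comprehension: for each j in range(i, len), keep list_words[j] iff it has find('.') > 0
-- (pyGet? is always 'some' inside Pre_; the 'none' IndexError case is excluded by Pre_find_imports)
def find_imports_alt (list_words : List String) (i : Int) : List String :=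
  (PySem.List.pyRange i (list_words.length : Int) 1).filterMap
    (fun j => (PySem.List.pyGet? list_words j).filter (fun w => 0 < PySem.Str.find w "."))

-- ===== PRECONDITION & SPEC =====
-- Pre_ excludes exactly the inputs where Python A raises IndexError: i < -len(list_words) while i < len.
def Pre_find_imports (list_words : List String) (i : Int) : Prop :=
  -(list_words.length : Int) ≤ i
instance (list_words : List String) (i : Int) : Decidable (Pre_find_imports list_words i) := by unfold Pre_find_imports; infer_instance

def pvWitness_find_imports : List String × Int := (["Import", "Coq.Lists.List", "nat"], 0)

def Spec_find_imports (list_words : List String) (i : Int) (out : List String) : Prop := out = find_imports_alt list_words i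
instance (list_words : List String) (i : Int) (out : List String) : Decidable (Spec_find_imports list_words i out) := by unfold Spec_find_imports; infer_instance

-- ===== CLAIM (what is proved, stated in full; the proofs are below) =====
def Claim_equal_find_imports : Prop := ∀ (list_words : List String) (i : Int), Dom_find_imports list_words i → Pre_find_imports list_words i → Spec_find_imports list_words i (find_imports list_words i)

-- ===== LEMMAS AND PROOFS =====
theorem find_imports_eq_alt (list_words : List String) :
    ∀ (n : Nat) (i : Int),
      ((list_words.length : Int) - i).toNat = n →
      -(list_words.length : Int) ≤ i →
      find_imports list_words i = find_imports_alt list_words i := by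
  intro n
  induction n with
  | zero =>
    intro i hn hpre
    have hge : (list_words.length : Int) ≤ i := by omega
    rw [find_imports]
    unfold find_imports_alt
    rw [PySem.List.pyRange_one_eq_nil hge]
    simp [not_lt.mpr hge]
  | succ n ih =>
    intro i hn hpre
    have hlt : i < (list_words.length : Int) := by omega
    have hsome : ∃ w, PySem.List.pyGet? list_words i = some w := by
      rcases h : PySem.List.pyGet? list_words i with _ | w
      · exfalso
        have := (PySem.List.pyGet?_eq_none_iff (xs := list_words) (i := i)).mp h
        exact this ⟨hpre, hlt⟩
      · exact ⟨w, rfl⟩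
    rcases hsome with ⟨w, hw⟩
    have hrec : find_imports list_words (i + 1) = find_imports_alt list_words (i + 1) :=
      ih (i + 1) (by omega) (by omega)
    rw [find_imports]
    unfold find_imports_alt
    rw [PySem.List.pyRange_one_cons hlt]
    simp only [List.filterMap_cons, hw, dif_pos hlt]
    by_cases h1 : w = "Import" ∨ w = "Export"
    · have hnd : ¬ (0 < PySem.Str.find w ".") := by
        rcases h1 with h1 | h1 <;> subst h1 <;> decide
      simp only [if_pos h1, Option.filter_some, decide_eq_false hnd, if_false,
        Bool.false_eq_true]
      exact hrec
    · simp only [if_neg h1]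
      by_cases h2 : 0 < PySem.Str.find w "."
      · simp only [if_pos h2, Option.filter_some, decide_eq_true h2, if_true]
        rw [hrec, find_imports_alt]
      · simp only [if_neg h2, Option.filter_some, decide_eq_false h2, if_false,
          Bool.false_eq_true]
        exact hrec

-- ===== VERDICT (by name: the statement is the Claim_ definition above) =====
theorem find_imports_spec : Claim_equal_find_imports := by
  intro list_words i _ hpre
  exact find_imports_eq_alt list_words (((list_words.length : Int) - i).toNat) i rfl hpre
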